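-- pv_equiv track=rewrite | github.com/FZ2000/apc-cli | src/appliers/memory_section.py | build_memory_section
-- ===== SOURCE A (Python) =====
-- from typing import Dict, List, Optional, Tuple
--
-- def build_memory_section(
--     entries: List[Dict],
--     category_headers: Dict[str, str],
--     title: str = "AI Context — Synced by apc",
-- ) -> str:
--     """Build the markdown that goes between the APC markers.
--
--     Returns the *inner* content (without the markers themselves).
--     """
--     by_category: Dict[str, List[str]] = {}
--     for entry in entries:
--         cat = entry.get("category", "preference")
--         content = entry.get("content", "")
--         if content:
--             by_category.setdefault(cat, []).append(content)
--
--     lines = [f"# {title}", ""]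
--     for category, header in category_headers.items():
--         items = by_category.get(category, [])
--         if items:
--             lines.append(f"## {header}")
--             for item in items:
--                 lines.append(f"- {item}")
--             lines.append("")
--
--     return "\n".join(lines)
-- ===== SOURCE B (Python) =====
-- from typing import Dict, List
--
--
-- def build_memory_section(
--     entries: List[Dict],
--     category_headers: Dict[str, str],
--     title: str = "AI Context — Synced by apc",
-- ) -> str:
--     """Build the markdown that goes between the APC markers (inner content only).
--
--     Instead of grouping entries into a dict first, scan the entries once per
--     category while walking the category headers."""
--     lines = [f"# {title}", ""]
--     for category, header in category_headers.items():
--         contents = [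
--             e.get("content", "")
--             for e in entries
--             if e.get("category", "preference") == category and e.get("content", "")
--         ]
--         if contents:
--             lines.append(f"## {header}")
--             lines.extend(f"- {c}" for c in contents)
--             lines.append("")
--     return "\n".join(lines)
-- ===== Notes on version B (the rewrite author's own statement) =====
-- stated objective: simpler
-- what changed: B drops the by_category grouping dict entirely: for each (category, header) pair it re-scans the entries with one list comprehension collecting truthy contents of that category, so no intermediate index is built or looked up.
import Mathlib
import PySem

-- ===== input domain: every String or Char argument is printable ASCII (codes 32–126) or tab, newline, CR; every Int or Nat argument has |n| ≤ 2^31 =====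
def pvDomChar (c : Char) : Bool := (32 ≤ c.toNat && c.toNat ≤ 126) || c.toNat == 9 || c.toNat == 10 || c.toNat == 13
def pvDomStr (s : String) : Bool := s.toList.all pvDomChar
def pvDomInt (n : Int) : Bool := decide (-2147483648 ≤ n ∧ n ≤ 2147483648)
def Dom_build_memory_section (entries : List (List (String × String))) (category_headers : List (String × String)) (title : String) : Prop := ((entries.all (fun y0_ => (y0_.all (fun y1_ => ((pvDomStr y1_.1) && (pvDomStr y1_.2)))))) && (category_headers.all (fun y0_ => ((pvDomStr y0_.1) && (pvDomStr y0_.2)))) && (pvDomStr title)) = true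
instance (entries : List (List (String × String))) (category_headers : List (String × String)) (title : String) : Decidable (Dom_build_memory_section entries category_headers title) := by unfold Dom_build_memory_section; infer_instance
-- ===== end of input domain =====

-- B says in one line: B removes A's by_category grouping dict and instead, per header, re-scans the
-- entries collecting that category's truthy contents (simpler; same output, return value only).

-- ===== PORT A =====
-- loop body of A's grouping loop: setdefault(cat, []).append(content) = modify cat [] (· ++ [content])
def pvStepA (d : PySem.Dict String (List String)) (entry : List (String × String)) : PySem.Dict String (List String) :=
  let e := PySem.Dict.ofList entry
  let cat := e.getD "category" "preference"
  let content := e.getD "content" ""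
  if !(content == "") then d.modify cat [] (· ++ [content]) else d

-- literal transliteration of A: build the grouping dict, then walk category_headers.items()
-- appending lines, then '\n'.join
def build_memory_section (entries : List (List (String × String))) (category_headers : List (String × String)) (title : String) : String :=
  let by_category : PySem.Dict String (List String) := entries.foldl pvStepA PySem.Dict.empty
  let lines : List String :=
    (PySem.Dict.ofList category_headers).items.foldl (fun lines ch =>
      let items := by_category.getD ch.1 []
      if items ≠ [] then
        (items.foldl (fun ls item => ls ++ ["- " ++ item])
          (lines ++ ["## " ++ ch.2])) ++ [""]
      else lines)
      ["# " ++ title, ""]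
  PySem.Str.join "\n" lines

-- ===== PORT B =====
-- literal transliteration of Source B: no grouping dict; per header, one comprehension over entries
def build_memory_section_alt (entries : List (List (String × String))) (category_headers : List (String × String)) (title : String) : String :=
  let lines : List String :=
    (PySem.Dict.ofList category_headers).items.foldl (fun lines ch =>
      let contents : List String :=
        (entries.filter (fun entry =>
            let e := PySem.Dict.ofList entry
            e.getD "category" "preference" == ch.1 && !(e.getD "content" "" == ""))).map
          (fun entry => (PySem.Dict.ofList entry).getD "content" "")
      if contents ≠ [] then
        lines ++ ["## " ++ ch.2] ++ contents.map (fun c => "- " ++ c) ++ [""]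
      else lines)
      ["# " ++ title, ""]
  PySem.Str.join "\n" lines

-- ===== PRECONDITION & SPEC =====
def Spec_build_memory_section (entries : List (List (String × String))) (category_headers : List (String × String)) (title : String) (out : String) : Prop := out = build_memory_section_alt entries category_headers title
instance (entries : List (List (String × String))) (category_headers : List (String × String)) (title : String) (out : String) : Decidable (Spec_build_memory_section entries category_headers title out) := by unfold Spec_build_memory_section; infer_instance

-- ===== CLAIM (what is proved, stated in full; the proofs are below) =====
def Claim_equal_build_memory_section : Prop := ∀ (entries : List (List (String × String))) (category_headers : List (String × String)) (title : String), Dom_build_memory_section entries category_headers title → Spec_build_memory_section entries category_headers title (build_memory_section entries category_headers title)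

-- ===== LEMMAS AND PROOFS =====

-- the grouping-dict lookup of A equals B's filtered re-scan of the entries
theorem pv_group_getD (c : String) (l : List (List (String × String)))
    (d : PySem.Dict String (List String)) :
    (l.foldl pvStepA d).getD c []
      = d.getD c [] ++
        ((l.filter (fun entry =>
            (PySem.Dict.ofList entry).getD "category" "preference" == c &&
              !((PySem.Dict.ofList entry).getD "content" "" == ""))).map
          (fun entry => (PySem.Dict.ofList entry).getD "content" "")) := by
  induction l generalizing d with
  | nil => simp
  | cons hd tl ih =>
    rw [List.foldl_cons, ih, List.filter_cons]
    by_cases hc : (PySem.Dict.ofList hd).getD "content" "" = ""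
    · simp [pvStepA, hc]
    · by_cases hcat : (PySem.Dict.ofList hd).getD "category" "preference" = c
      · simp [pvStepA, hc, hcat, PySem.Dict.getD_modify_self]
      · simp [pvStepA, hc, hcat, PySem.Dict.getD_modify_of_ne _ _ _ (Ne.symm hcat)]

-- flatten of singleton blocks is a map (used to align the two per-item loops)
theorem pv_flatten_singleton {α β : Type} (g : α → β) (l : List α) :
    (l.map (fun x => [g x])).flatten = l.map g := by
  induction l with
  | nil => rfl
  | cons x xs ih => simp [ih]

-- the two line-building folds produce the same list of lines (their step functions are equal)
theorem pv_lines_eq (entries : List (List (String × String)))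
    (hs : List (String × String)) (acc : List String) :
    hs.foldl (fun lines ch =>
      let items := (entries.foldl pvStepA PySem.Dict.empty).getD ch.1 []
      if items ≠ [] then
        (items.foldl (fun ls item => ls ++ ["- " ++ item]) (lines ++ ["## " ++ ch.2])) ++ [""]
      else lines) acc
    = hs.foldl (fun lines ch =>
      let contents : List String :=
        (entries.filter (fun entry =>
            let e := PySem.Dict.ofList entry
            e.getD "category" "preference" == ch.1 && !(e.getD "content" "" == ""))).map
          (fun entry => (PySem.Dict.ofList entry).getD "content" "")
      if contents ≠ [] then
        lines ++ ["## " ++ ch.2] ++ contents.map (fun c => "- " ++ c) ++ [""]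
      else lines) acc := by
  have h : (fun (lines : List String) (ch : String × String) =>
      let items := (entries.foldl pvStepA PySem.Dict.empty).getD ch.1 []
      if items ≠ [] then
        (items.foldl (fun ls item => ls ++ ["- " ++ item]) (lines ++ ["## " ++ ch.2])) ++ [""]
      else lines)
    = (fun (lines : List String) (ch : String × String) =>
      let contents : List String :=
        (entries.filter (fun entry =>
            let e := PySem.Dict.ofList entry
            e.getD "category" "preference" == ch.1 && !(e.getD "content" "" == ""))).map
          (fun entry => (PySem.Dict.ofList entry).getD "content" "")
      if contents ≠ [] then
        lines ++ ["## " ++ ch.2] ++ contents.map (fun c => "- " ++ c) ++ [""]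
      else lines) := by
    funext lines ch
    simp only [pv_group_getD, PySem.Dict.getD_empty, List.nil_append,
      PySem.List.foldl_append_eq_flatMap, List.append_assoc]
    simp [List.flatMap, Function.comp_def, pv_flatten_singleton]
  rw [h]

-- ===== VERDICT (by name: the statement is the Claim_ definition above) =====
theorem build_memory_section_spec : Claim_equal_build_memory_section := by
  intro entries category_headers title _
  unfold Spec_build_memory_section
  exact congrArg (PySem.Str.join "\n")
    (pv_lines_eq entries (PySem.Dict.ofList category_headers).items ["# " ++ title, ""])
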